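-- pv_equiv track=rewrite | github.com/off-by-none/AdventOfCode | scripts/2015/aoc201505.py | contains_middle_letter
-- ===== SOURCE A (Python) =====
-- def contains_middle_letter(string):
--     pairs = []
--     for i in range(len(string) - 1):
--         pairs.append(string[i] + string[i + 1])
--
--     for i in range(len(pairs) - 1):
--         if pairs[i][0] == pairs[i + 1][1]:
--             return True
--
--     return False
-- ===== SOURCE B (Python) =====
-- import re
--
-- _PAT = re.compile(r'(.).\1', re.DOTALL)
--
-- def contains_middle_letter(string):
--     return _PAT.search(string) is not None
-- ===== Notes on version B (the rewrite author's own statement) =====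
-- stated objective: idiomatic
-- what changed: Replaced the explicit pair-list construction plus index loop with a single precompiled regex search r'(.).\1' with re.DOTALL; the scan runs in the C regex engine instead of Python bytecode, a constant-factor speedup.
import Mathlib
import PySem

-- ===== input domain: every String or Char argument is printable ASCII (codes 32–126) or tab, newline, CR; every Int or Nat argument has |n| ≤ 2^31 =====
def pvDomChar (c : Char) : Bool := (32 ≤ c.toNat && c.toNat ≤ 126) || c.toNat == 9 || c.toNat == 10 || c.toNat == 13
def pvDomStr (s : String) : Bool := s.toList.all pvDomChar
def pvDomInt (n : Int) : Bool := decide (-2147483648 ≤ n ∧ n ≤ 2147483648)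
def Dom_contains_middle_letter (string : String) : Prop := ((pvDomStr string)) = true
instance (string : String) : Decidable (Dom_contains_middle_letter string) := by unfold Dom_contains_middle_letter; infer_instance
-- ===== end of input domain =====

-- B replaces A's pair-list construction and index loop with a regex search r'(.).\1'
-- (ported as a left-to-right scan trying the pattern at each position); same cost, more idiomatic.

-- ===== PORT A =====
-- pairs.append(string[i] + string[i+1]) : the 2-char string is modelled as a Char × Char;
-- pairs[i][0] is its .1 and pairs[i+1][1] its .2. Indices produced by range are always in
-- bounds, so getD with a dummy default is exact here.
def contains_middle_letter (string : String) : Bool :=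
  let s := string.toList
  let pairs := (List.range (s.length - 1)).map
    (fun i => (s.getD i ' ', s.getD (i + 1) ' '))
  (List.range (pairs.length - 1)).any
    (fun i => (pairs.getD i (' ', ' ')).1 == (pairs.getD (i + 1) (' ', ' ')).2)

-- ===== PORT B =====
-- The regex engine's search for r'(.).\1' (DOTALL): try the pattern at each successive
-- position; it matches at a position iff the char there equals the char two later.
def reSearchScan : List Char → Bool
  | a :: b :: c :: rest => if a == c then true else reSearchScan (b :: c :: rest)
  | _ => false

def contains_middle_letter_alt (string : String) : Bool :=
  reSearchScan string.toList

-- ===== PRECONDITION & SPEC =====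
def Spec_contains_middle_letter (string : String) (out : Bool) : Prop := out = contains_middle_letter_alt string
instance (string : String) (out : Bool) : Decidable (Spec_contains_middle_letter string out) := by unfold Spec_contains_middle_letter; infer_instance

-- ===== CLAIM (what is proved, stated in full; the proofs are below) =====
def Claim_equal_contains_middle_letter : Prop := ∀ (string : String), Dom_contains_middle_letter string → Spec_contains_middle_letter string (contains_middle_letter string)

-- ===== LEMMAS AND PROOFS =====

-- Characterise B's scan as an existential over indices.
theorem reSearchScan_iff : ∀ (l : List Char),
    reSearchScan l = true ↔ ∃ i, i + 2 < l.length ∧ l.getD i ' ' = l.getD (i + 2) ' '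
  | [] => by simp [reSearchScan]
  | [a] => by simp [reSearchScan]
  | [a, b] => by simp [reSearchScan]
  | a :: b :: c :: rest => by
    have ih := reSearchScan_iff (b :: c :: rest)
    constructor
    · intro h
      by_cases hac : a = c
      · exact ⟨0, by simp, by simp [hac]⟩
      · have h' : reSearchScan (b :: c :: rest) = true := by
          simpa [reSearchScan, hac] using h
        obtain ⟨i, hi, he⟩ := ih.1 h'
        refine ⟨i + 1, by simp at hi ⊢; omega, ?_⟩
        simpa using he
    · rintro ⟨i, hi, he⟩
      cases i with
      | zero =>
        have hac : a = c := by simpa using he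
        simp [reSearchScan, hac]
      | succ j =>
        have h' : reSearchScan (b :: c :: rest) = true := by
          refine ih.2 ⟨j, by simp at hi ⊢; omega, ?_⟩
          simpa using he
        simp [reSearchScan, h']

theorem getD_map_range {α : Type} (m i : Nat) (f : Nat → α) (d : α) (h : i < m) :
    ((List.range m).map f).getD i d = f i := by
  simp [List.getD_eq_getElem?_getD, h]

-- Characterise A's loop the same way.
theorem portA_iff (l : List Char) :
    ((List.range (((List.range (l.length - 1)).map
        (fun i => (l.getD i ' ', l.getD (i + 1) ' '))).length - 1)).any
      (fun i =>
        (((List.range (l.length - 1)).map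
            (fun j => (l.getD j ' ', l.getD (j + 1) ' '))).getD i (' ', ' ')).1 ==
        (((List.range (l.length - 1)).map
            (fun j => (l.getD j ' ', l.getD (j + 1) ' '))).getD (i + 1) (' ', ' ')).2) = true)
    ↔ ∃ i, i + 2 < l.length ∧ l.getD i ' ' = l.getD (i + 2) ' ' := by
  simp only [List.length_map, List.length_range, List.any_eq_true, List.mem_range]
  constructor
  · rintro ⟨i, hi, hc⟩
    rw [getD_map_range _ _ _ _ (by omega), getD_map_range _ _ _ _ (by omega)] at hc
    exact ⟨i, by omega, by simpa [show i + 1 + 1 = i + 2 from rfl] using hc⟩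
  · rintro ⟨i, hi, he⟩
    refine ⟨i, by omega, ?_⟩
    rw [getD_map_range _ _ _ _ (by omega), getD_map_range _ _ _ _ (by omega)]
    simpa [show i + 1 + 1 = i + 2 from rfl] using he

-- ===== VERDICT (by name: the statement is the Claim_ definition above) =====
theorem contains_middle_letter_spec : Claim_equal_contains_middle_letter := by
  intro s _
  unfold Spec_contains_middle_letter contains_middle_letter contains_middle_letter_alt
  rw [Bool.eq_iff_iff]
  simpa using (portA_iff s.toList).trans (reSearchScan_iff s.toList).symm
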